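-- pv_equiv track=rewrite | github.com/pylint-dev/pylint | script/check_message_references.py | _is_in_code_block
-- ===== SOURCE A (Python) =====
-- def _is_in_code_block(content: str, match_start: int) -> bool:
--     """Check if a match position is inside a code block.
--
--     Args:
--         content: The full file content
--         match_start: The start position of the match
--
--     Returns:
--         True if the match is inside a code block
--     """
--     # Get the content before the match
--     before_match = content[:match_start]
--
--     # Check for RST code blocks
--     if ".. code-block::" in before_match or "\n::" in before_match:
--         # Simple heuristic: count indentation changes after last code block start
--         lines_before = before_match.split("\n")
--         for i in range(len(lines_before) - 1, -1, -1):
--             line = lines_before[i]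
--             if ".. code-block::" in line or (line.strip() == "::"):
--                 # We're likely in a code block if we haven't seen a dedent
--                 return True
--             if line and not line[0].isspace() and line.strip():
--                 # Found a non-indented line, probably out of code block
--                 break
--
--     # Check for Markdown code fences
--     fence_count = before_match.count("```") + before_match.count("~~~")
--     if fence_count % 2 == 1:  # Odd number means we're inside a fence
--         return True
--
--     # Check if we're in inline code
--     line_start = before_match.rfind("\n") + 1
--     line_end = content.find("\n", match_start)
--     if line_end == -1:
--         line_end = len(content)
--     current_line = content[line_start:line_end]
--
--     # Check for inline code patterns
--     rel_pos = match_start - line_start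
--     for pattern in ("``", "`"):
--         parts = current_line.split(pattern)
--         current_pos = 0
--         in_code = False
--         for i, part in enumerate(parts):
--             if i > 0:
--                 in_code = not in_code
--             if current_pos <= rel_pos < current_pos + len(part):
--                 return in_code
--             current_pos += len(part) + len(pattern)
--
--     return False
-- ===== SOURCE B (Python) =====
-- def _is_in_code_block(content: str, match_start: int) -> bool:
--     """Check if a match position is inside a code block (alternative implementation)."""
--     before = content[:match_start]
--
--     # RST: single forward pass tracking whether the most recent structurally
--     # relevant line was a code-block marker (instead of A's backward scan).
--     if ".. code-block::" in before or "\n::" in before: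
--         in_rst = False
--         for line in before.split("\n"):
--             if ".. code-block::" in line or line.strip() == "::":
--                 in_rst = True
--             elif line and not line[0].isspace() and line.strip():
--                 in_rst = False
--         if in_rst:
--             return True
--
--     # Markdown fences: parity of fence delimiters before the match.
--     if (before.count("```") + before.count("~~~")) % 2 == 1:
--         return True
--
--     # Inline code: count delimiter occurrences left of the position instead of
--     # walking the split() segments.
--     line_start = before.rfind("\n") + 1
--     line_end = content.find("\n", match_start)
--     if line_end == -1:
--         line_end = len(content)
--     current_line = content[line_start:line_end]
--     rel_pos = match_start - line_start
--     for pattern in ("``", "`"):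
--         verdict = _inline_verdict(current_line, rel_pos, pattern)
--         if verdict is not None:
--             return verdict
--     return False
--
--
-- def _inline_verdict(line: str, pos: int, pattern: str):
--     """Parity of non-overlapping `pattern` occurrences strictly left of `pos`;
--     None if `pos` is outside the line or lands on a delimiter occurrence."""
--     if pos < 0 or pos >= len(line):
--         return None
--     i = 0
--     count = 0
--     while i <= pos:
--         if line.startswith(pattern, i):
--             if pos < i + len(pattern):
--                 return None
--             count += 1
--             i += len(pattern)
--         else:
--             i += 1
--     return count % 2 == 1
-- ===== Notes on version B (the rewrite author's own statement) =====
-- stated objective: alternative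
-- what changed: The RST backward indexed line scan (with break) is replaced by a single forward fold over the lines tracking whether the most recent structurally relevant line was a code-block marker, and inline-code membership is computed by one greedy character scan counting non-overlapping delimiter occurrences left of the position instead of walking split() segments with running offsets.
import Mathlib
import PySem

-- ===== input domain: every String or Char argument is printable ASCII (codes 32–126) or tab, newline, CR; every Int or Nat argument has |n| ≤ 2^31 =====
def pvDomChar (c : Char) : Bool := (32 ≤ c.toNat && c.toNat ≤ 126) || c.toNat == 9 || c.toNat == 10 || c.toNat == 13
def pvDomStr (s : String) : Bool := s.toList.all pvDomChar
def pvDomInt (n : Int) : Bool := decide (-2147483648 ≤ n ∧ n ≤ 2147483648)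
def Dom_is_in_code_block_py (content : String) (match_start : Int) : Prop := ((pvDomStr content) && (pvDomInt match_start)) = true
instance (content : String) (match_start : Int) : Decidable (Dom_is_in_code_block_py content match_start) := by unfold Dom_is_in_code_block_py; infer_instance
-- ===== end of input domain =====

-- B rewrites A's RST backward line scan as one forward fold over the lines and
-- computes inline-code membership by counting delimiter occurrences left of the
-- position instead of walking split() segments; same results, same cost (objective: alternative).

-- ===== PORT A =====
-- '".. code-block::" in line or line.strip() == "::"'
def pvMarkerA (line : List Char) : Bool :=
  PySem.Chars.isIn ".. code-block::".toList line || (PySem.Chars.strip line == "::".toList)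

-- 'line and not line[0].isspace() and line.strip()'  (line[0] exists whenever line is truthy)
def pvBrkA (line : List Char) : Bool :=
  !line.isEmpty && !(PySem.Chars.isspace ((PySem.List.pyGet? line 0).getD ' ')) &&
    !(PySem.Chars.strip line).isEmpty

-- 'for i in range(len(lines_before) - 1, -1, -1)': countdown over indices, fuel = current index + 1
def pvAScan (lines : List (List Char)) : Nat → Option Bool
  | 0 => none
  | n + 1 =>
    let line := (PySem.List.pyGet? lines ((n : Nat) : Int)).getD []
    if pvMarkerA line then some true
    else if pvBrkA line then none
    else pvAScan lines n

-- 'for i, part in enumerate(parts): …' with current_pos / in_code state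
def pvAInline (pat : List Char) (pos : Int) : List (List Char) → Nat → Int → Bool → Option Bool
  | [], _, _, _ => none
  | part :: rest, i, curPos, inCode =>
    let ic := if 0 < i then !inCode else inCode
    if curPos ≤ pos ∧ pos < curPos + (part.length : Int) then some ic
    else pvAInline pat pos rest (i + 1) (curPos + (part.length : Int) + (pat.length : Int)) ic

def is_in_code_block_py (content : String) (match_start : Int) : Bool :=
  let cs := content.toList
  let before := PySem.List.slice cs none (some match_start)
  let phase1 : Option Bool :=
    if PySem.Chars.isIn ".. code-block::".toList before || PySem.Chars.isIn "\n::".toList before then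
      let lines := PySem.Chars.splitOn before "\n".toList
      pvAScan lines lines.length
    else none
  match phase1 with
  | some b => b
  | none =>
    let fence := PySem.Chars.count before "```".toList + PySem.Chars.count before "~~~".toList
    if fence % 2 == 1 then true
    else
      let lineStart := PySem.Chars.rfind before "\n".toList + 1
      let f := PySem.Chars.findFrom cs "\n".toList match_start none
      let lineEnd := if f == -1 then (cs.length : Int) else f
      let curLine := PySem.List.slice cs (some lineStart) (some lineEnd)
      let relPos := match_start - lineStart
      match pvAInline "``".toList relPos (PySem.Chars.splitOn curLine "``".toList) 0 0 false with
      | some v => v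
      | none =>
        match pvAInline "`".toList relPos (PySem.Chars.splitOn curLine "`".toList) 0 0 false with
        | some v => v
        | none => false

-- ===== PORT B =====
def pvMarkerB (line : List Char) : Bool :=
  PySem.Chars.isIn ".. code-block::".toList line || (PySem.Chars.strip line == "::".toList)

def pvBrkB (line : List Char) : Bool :=
  !line.isEmpty && !(PySem.Chars.isspace ((PySem.List.pyGet? line 0).getD ' ')) &&
    !(PySem.Chars.strip line).isEmpty

-- the 'while i <= pos' scan of _inline_verdict; the suffix of the line at index q is carried
-- explicitly (line.startswith(pattern, i) = pattern prefix of suffix); pattern = p0 :: prest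
def pvBScan (p0 : Char) (prest : List Char) (pos : Int) : List Char → Int → Int → Option Bool
  | [], _, cnt => some (PySem.Int.mod cnt 2 == 1)
  | c :: rest, q, cnt =>
    if pos < q then some (PySem.Int.mod cnt 2 == 1)
    else if (p0 :: prest).isPrefixOf (c :: rest) then
      if pos < q + ((p0 :: prest).length : Int) then none
      else pvBScan p0 prest pos (rest.drop prest.length) (q + ((p0 :: prest).length : Int)) (cnt + 1)
    else pvBScan p0 prest pos rest (q + 1) cnt
  termination_by l => l.length
  decreasing_by all_goals (simp [List.length_drop]; try omega)

-- _inline_verdict; the [] pattern branch only makes the function total (callers pass "``"/"`")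
def pvBInline (line : List Char) (pos : Int) (pat : List Char) : Option Bool :=
  match pat with
  | [] => none
  | p0 :: prest =>
    if pos < 0 ∨ (line.length : Int) ≤ pos then none
    else pvBScan p0 prest pos line 0 0

def is_in_code_block_py_alt (content : String) (match_start : Int) : Bool :=
  let cs := content.toList
  let before := PySem.List.slice cs none (some match_start)
  let inRst :=
    (PySem.Chars.isIn ".. code-block::".toList before || PySem.Chars.isIn "\n::".toList before) &&
      (PySem.Chars.splitOn before "\n".toList).foldl
        (fun s line => if pvMarkerB line then true else if pvBrkB line then false else s) false
  if inRst then true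
  else if (PySem.Chars.count before "```".toList + PySem.Chars.count before "~~~".toList) % 2 == 1 then
    true
  else
    let lineStart := PySem.Chars.rfind before "\n".toList + 1
    let f := PySem.Chars.findFrom cs "\n".toList match_start none
    let lineEnd := if f == -1 then (cs.length : Int) else f
    let curLine := PySem.List.slice cs (some lineStart) (some lineEnd)
    let relPos := match_start - lineStart
    match pvBInline curLine relPos "``".toList with
    | some v => v
    | none =>
      match pvBInline curLine relPos "`".toList with
      | some v => v
      | none => false

-- ===== PRECONDITION & SPEC =====
def Spec_is_in_code_block_py (content : String) (match_start : Int) (out : Bool) : Prop := out = is_in_code_block_py_alt content match_start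
instance (content : String) (match_start : Int) (out : Bool) : Decidable (Spec_is_in_code_block_py content match_start out) := by unfold Spec_is_in_code_block_py; infer_instance

-- ===== CLAIM (what is proved, stated in full; the proofs are below) =====
def Claim_equal_is_in_code_block_py : Prop := ∀ (content : String) (match_start : Int), Dom_is_in_code_block_py content match_start → Spec_is_in_code_block_py content match_start (is_in_code_block_py content match_start)

-- ===== LEMMAS AND PROOFS =====

theorem pvMarkerB_eq : pvMarkerB = pvMarkerA := rfl
theorem pvBrkB_eq : pvBrkB = pvBrkA := rfl

-- the countdown scan ignores appended lines beyond its fuel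
theorem pvAScan_append (x : List Char) (lines : List (List Char)) (n : Nat)
    (h : n ≤ lines.length) : pvAScan (lines ++ [x]) n = pvAScan lines n := by
  induction n with
  | zero => rfl
  | succ m ih =>
    simp only [pvAScan]
    rw [PySem.List.pyGet?_natCast, PySem.List.pyGet?_natCast,
      List.getElem?_append_left (by omega)]
    split_ifs
    · rfl
    · rfl
    · exact ih (by omega)

-- backward first-marker-before-break scan = forward fold
theorem pvAScan_eq_foldl (lines : List (List Char)) :
    pvAScan lines lines.length =
      if lines.foldl (fun s line => if pvMarkerA line then true else if pvBrkA line then false else s) false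
      then some true else none := by
  induction lines using List.reverseRecOn with
  | nil => rfl
  | append_singleton xs x ih =>
    have hx : (PySem.List.pyGet? (xs ++ [x]) ((xs.length : Nat) : Int)).getD [] = x := by
      rw [PySem.List.pyGet?_natCast]; simp
    simp only [List.length_append, List.length_cons, List.length_nil, List.foldl_append,
      List.foldl_cons, List.foldl_nil]
    show pvAScan (xs ++ [x]) (xs.length + 1) = _
    rw [pvAScan]
    simp only [hx]
    cases hm : pvMarkerA x <;> cases hk : pvBrkA x <;>
      simp_all [pvAScan_append x xs xs.length (le_refl _), ih]

-- greedy split, recursively (sep = s0 :: srest)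
def pvSplitSpec (s0 : Char) (srest : List Char) : List Char → List (List Char)
  | [] => [[]]
  | c :: rest =>
    if (s0 :: srest).isPrefixOf (c :: rest) then
      [] :: pvSplitSpec s0 srest (rest.drop srest.length)
    else
      match pvSplitSpec s0 srest rest with
      | [] => [[c]]
      | p :: ps => (c :: p) :: ps
  termination_by l => l.length
  decreasing_by all_goals (simp [List.length_drop]; try omega)

theorem pvSplitSpec_ne_nil (s0 : Char) (srest l : List Char) :
    pvSplitSpec s0 srest l ≠ [] := by
  fun_induction pvSplitSpec s0 srest l <;> simp_all

-- splitOn.go with enough fuel computes pvSplitSpec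
theorem pvSplitOn_go_eq (s0 : Char) (srest : List Char) :
    ∀ (fuel : Nat) (l cur : List Char) (acc : List (List Char)), l.length ≤ fuel →
      PySem.Chars.splitOn.go (s0 :: srest) fuel l cur acc =
        acc.reverse ++
          (match pvSplitSpec s0 srest l with
           | [] => []
           | p :: ps => (cur.reverse ++ p) :: ps) := by
  intro fuel
  induction fuel with
  | zero =>
    intro l cur acc h
    have hl : l = [] := by cases l <;> simp_all
    subst hl
    simp only [pvSplitSpec]
    rw [show PySem.Chars.splitOn.go (s0 :: srest) 0 [] cur acc
        = ((cur.reverse ++ []) :: acc).reverse from rfl]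
    simp
  | succ f ih =>
    intro l cur acc h
    match l with
    | [] =>
      simp only [pvSplitSpec]
      rw [show PySem.Chars.splitOn.go (s0 :: srest) (f + 1) [] cur acc
          = (cur.reverse :: acc).reverse from rfl]
      simp
    | c :: rest =>
      rw [show PySem.Chars.splitOn.go (s0 :: srest) (f + 1) (c :: rest) cur acc
          = (if (s0 :: srest).isPrefixOf (c :: rest)
             then PySem.Chars.splitOn.go (s0 :: srest) f (rest.drop srest.length) []
                    (cur.reverse :: acc)
             else PySem.Chars.splitOn.go (s0 :: srest) f rest (c :: cur) acc) from rfl]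
      simp only [pvSplitSpec]
      by_cases hpre : (s0 :: srest).isPrefixOf (c :: rest) = true
      · rw [if_pos hpre, if_pos hpre]
        rw [ih (rest.drop srest.length) [] (cur.reverse :: acc) (by simp at h ⊢; omega)]
        rcases hr : pvSplitSpec s0 srest (rest.drop srest.length) with _ | ⟨p, ps⟩
        · exact absurd hr (pvSplitSpec_ne_nil _ _ _)
        · simp
      · rw [if_neg hpre, if_neg hpre]
        rw [ih rest (c :: cur) acc (by simp at h ⊢; omega)]
        rcases hr : pvSplitSpec s0 srest rest with _ | ⟨p, ps⟩
        · exact absurd hr (pvSplitSpec_ne_nil _ _ _)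
        · simp

theorem pvSplitOn_eq_spec (s0 : Char) (srest l : List Char) :
    PySem.Chars.splitOn l (s0 :: srest) = pvSplitSpec s0 srest l := by
  rw [show PySem.Chars.splitOn l (s0 :: srest)
      = PySem.Chars.splitOn.go (s0 :: srest) (l.length + 1) l [] [] from rfl]
  rw [pvSplitOn_go_eq s0 srest (l.length + 1) l [] [] (by omega)]
  rcases hr : pvSplitSpec s0 srest l with _ | ⟨p, ps⟩
  · exact absurd hr (pvSplitSpec_ne_nil _ _ _)
  · simp

-- the enumerate walk with the index folded away (toggle moved to the recursive call)
def pvAWalk (pat : List Char) (pos : Int) : List (List Char) → Int → Bool → Option Bool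
  | [], _, _ => none
  | p :: ps, q, ic =>
    if q ≤ pos ∧ pos < q + (p.length : Int) then some ic
    else pvAWalk pat pos ps (q + (p.length : Int) + (pat.length : Int)) (!ic)

theorem pvAInline_succ_eq_walk (pat : List Char) (pos : Int) :
    ∀ (parts : List (List Char)) (i : Nat) (q : Int) (ic : Bool),
      pvAInline pat pos parts (i + 1) q ic = pvAWalk pat pos parts q (!ic) := by
  intro parts
  induction parts with
  | nil => intro i q ic; rfl
  | cons p ps ih =>
    intro i q ic
    simp only [pvAInline, pvAWalk]
    rw [if_pos (Nat.succ_pos i)]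
    split_ifs with h
    · rfl
    · exact ih (i + 1) _ (!ic)

theorem pvAInline_zero_eq_walk (pat : List Char) (pos : Int) (parts : List (List Char))
    (q : Int) (ic : Bool) : pvAInline pat pos parts 0 q ic = pvAWalk pat pos parts q ic := by
  cases parts with
  | nil => rfl
  | cons p ps =>
    simp only [pvAInline, pvAWalk]
    rw [if_neg (lt_irrefl 0)]
    split_ifs with h
    · rfl
    · exact pvAInline_succ_eq_walk pat pos ps 0 _ ic

-- pos left of every remaining part: the walk reports nothing
theorem pvAWalk_none_of_lt (pat : List Char) (pos : Int) :
    ∀ (parts : List (List Char)) (q : Int) (ic : Bool), pos < q →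
      pvAWalk pat pos parts q ic = none := by
  intro parts
  induction parts with
  | nil => intro q ic _; rfl
  | cons p ps ih =>
    intro q ic h
    simp only [pvAWalk]
    rw [if_neg (by omega)]
    exact ih _ _ (by omega)

-- shifting one leading character out of the head part
theorem pvAWalk_shift (pat : List Char) (pos : Int) (c : Char) (p : List Char)
    (ps : List (List Char)) (q : Int) (ic : Bool) (h : q < pos) :
    pvAWalk pat pos ((c :: p) :: ps) q ic = pvAWalk pat pos (p :: ps) (q + 1) ic := by
  simp only [pvAWalk]
  have hc : (q ≤ pos ∧ pos < q + (((c :: p).length : Nat) : Int)) ↔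
      (q + 1 ≤ pos ∧ pos < q + 1 + ((p.length : Nat) : Int)) := by
    simp only [List.length_cons]
    push_cast
    omega
  split_ifs with h1 h2 h2 <;> try rfl
  · exact absurd (hc.mp h1) h2
  · exact absurd (hc.mpr h2) h1
  · congr 1
    simp only [List.length_cons]
    push_cast
    omega

-- pos right of the whole suffix: the walk over its split reports nothing
theorem pvAWalk_none_of_ge (s0 : Char) (srest : List Char) (pos : Int) :
    ∀ (n : Nat) (l : List Char) (q : Int) (ic : Bool), l.length ≤ n →
      q + (l.length : Int) ≤ pos →
      pvAWalk (s0 :: srest) pos (pvSplitSpec s0 srest l) q ic = none := by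
  intro n
  induction n with
  | zero =>
    intro l q ic hn h
    have hl : l = [] := by cases l <;> simp_all
    subst hl
    simp only [pvSplitSpec, pvAWalk]
    simp only [List.length_nil, Nat.cast_zero, add_zero] at h ⊢
    rw [if_neg (by omega)]
  | succ m ih =>
    intro l q ic hn h
    match l with
    | [] =>
      simp only [pvSplitSpec, pvAWalk]
      simp only [List.length_nil, Nat.cast_zero, add_zero] at h ⊢
      rw [if_neg (by omega)]
    | c :: rest =>
      simp only [List.length_cons] at hn h
      push_cast at h
      simp only [pvSplitSpec]
      by_cases hpre : (s0 :: srest).isPrefixOf (c :: rest) = true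
      · rw [if_pos hpre]
        simp only [pvAWalk, List.length_nil, Nat.cast_zero, add_zero, List.length_cons]
        rw [if_neg (by omega)]
        have hlen := (List.isPrefixOf_iff_prefix.mp hpre).length_le
        simp only [List.length_cons] at hlen
        apply ih (rest.drop srest.length) _ _ (by simp; omega)
        simp only [List.length_drop]
        omega
      · rw [if_neg hpre]
        rcases hr : pvSplitSpec s0 srest rest with _ | ⟨p, ps⟩
        · exact absurd hr (pvSplitSpec_ne_nil _ _ _)
        · rw [pvAWalk_shift _ _ _ _ _ _ _ (by omega), ← hr]
          apply ih rest _ _ (by omega)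
          push_cast
          omega

theorem pvParity_flip (c : Int) :
    (PySem.Int.mod (c + 1) 2 == 1) = !(PySem.Int.mod c 2 == 1) := by
  rw [PySem.Int.mod_eq_emod_of_pos (a := c + 1) (by norm_num),
    PySem.Int.mod_eq_emod_of_pos (a := c) (by norm_num)]
  rcases Int.emod_two_eq c with h | h <;>
    · have h2 : (c + 1) % 2 = 1 - c % 2 := by omega
      simp [h, h2]

-- the core correspondence: walking the split of the suffix l (at base position q) with the
-- parity of cnt equals B's counting scan, whenever pos lies inside l's span
theorem pvWalk_eq_scan (s0 : Char) (srest : List Char) (pos : Int) :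
    ∀ (n : Nat) (l : List Char) (q cnt : Int), l.length ≤ n →
      q ≤ pos → pos < q + (l.length : Int) →
      pvAWalk (s0 :: srest) pos (pvSplitSpec s0 srest l) q (PySem.Int.mod cnt 2 == 1) =
        pvBScan s0 srest pos l q cnt := by
  intro n
  induction n with
  | zero =>
    intro l q cnt hn h1 h2
    have hl : l = [] := by cases l <;> simp_all
    subst hl
    simp at h2
    omega
  | succ m ih =>
    intro l q cnt hn h1 h2
    match l with
    | [] =>
      simp at h2
      omega
    | c :: rest =>
      simp only [List.length_cons] at hn h2
      push_cast at h2
      simp only [pvSplitSpec, pvBScan]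
      rw [if_neg (show ¬ pos < q by omega)]
      by_cases hpre : (s0 :: srest).isPrefixOf (c :: rest) = true
      · rw [if_pos hpre, if_pos hpre]
        have hlen := (List.isPrefixOf_iff_prefix.mp hpre).length_le
        simp only [List.length_cons] at hlen
        simp only [pvAWalk, List.length_nil, Nat.cast_zero, add_zero, List.length_cons]
        rw [if_neg (by omega)]
        by_cases hin : pos < q + (((srest.length + 1 : Nat) : Nat) : Int)
        · rw [if_pos (by push_cast at hin ⊢; omega)]
          exact pvAWalk_none_of_lt _ _ _ _ _ (by push_cast at hin ⊢; omega)
        · rw [if_neg (by push_cast at hin ⊢; omega)]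
          rw [← pvParity_flip]
          have := ih (rest.drop srest.length) (q + ((srest.length + 1 : Nat) : Int)) (cnt + 1)
            (by simp; omega) (by push_cast at hin ⊢; omega)
            (by simp only [List.length_drop]; push_cast; omega)
          exact this
      · rw [if_neg hpre, if_neg hpre]
        rcases hr : pvSplitSpec s0 srest rest with _ | ⟨p, ps⟩
        · exact absurd hr (pvSplitSpec_ne_nil _ _ _)
        · by_cases hq : q = pos
          · simp only [pvAWalk]
            rw [if_pos (by simp; omega)]
            cases rest with
            | nil => simp only [pvBScan]
            | cons c2 r2 =>
              simp only [pvBScan]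
              rw [if_pos (by omega)]
          · rw [pvAWalk_shift _ _ _ _ _ _ _ (by omega), ← hr]
            exact ih rest (q + 1) cnt (by omega) (by omega) (by omega)

-- per-pattern: A's split walk = B's verdict
theorem pvInline_eq (s0 : Char) (srest line : List Char) (pos : Int) :
    pvAInline (s0 :: srest) pos (PySem.Chars.splitOn line (s0 :: srest)) 0 0 false =
      pvBInline line pos (s0 :: srest) := by
  rw [pvSplitOn_eq_spec, pvAInline_zero_eq_walk]
  simp only [pvBInline]
  by_cases hneg : pos < 0
  · rw [if_pos (Or.inl hneg)]
    exact pvAWalk_none_of_lt _ _ _ _ _ hneg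
  · by_cases hbig : (line.length : Int) ≤ pos
    · rw [if_pos (Or.inr hbig)]
      exact pvAWalk_none_of_ge s0 srest pos line.length line 0 false (le_refl _) (by omega)
    · rw [if_neg (by tauto)]
      rw [show (false : Bool) = (PySem.Int.mod 0 2 == 1) by decide]
      exact pvWalk_eq_scan s0 srest pos line.length line 0 0 (le_refl _) (by omega) (by omega)

theorem pvAssemble (g w fa fb : Bool) (ha : fa = fb) :
    (match (if g = true then (if w = true then some true else none) else none) with
      | some b => b
      | none => fa) =
    (if (g && w) = true then true else fb) := by
  cases g <;> cases w <;> simp [ha]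

-- ===== VERDICT (by name: the statement is the Claim_ definition above) =====
theorem is_in_code_block_py_spec : Claim_equal_is_in_code_block_py := by
  intro content match_start _
  unfold Spec_is_in_code_block_py
  simp only [is_in_code_block_py, is_in_code_block_py_alt, pvMarkerB_eq, pvBrkB_eq]
  rw [pvAScan_eq_foldl]
  rw [show "``".toList = '`' :: ['`'] from rfl, show "`".toList = '`' :: ([] : List Char) from rfl]
  rw [pvInline_eq '`' ['`'], pvInline_eq '`' []]
  exact pvAssemble _ _ _ _ rfl
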